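-- pv_equiv track=rewrite | github.com/jiacheng-xu/neu-compression-sum | neusum/data/generate_compression_based_data.py | generate_span_segmentation
-- ===== SOURCE A (Python) =====
-- from typing import List
--
-- def generate_span_segmentation(doc_list: List[str]) -> List[int]:
--     span = []
--     jdx = 0
--     for d in doc_list:
--         num = len([x for x in d.split(' ') if x != ''])
--         span.append(jdx)
--         span.append(jdx + num - 1)
--         jdx += num
--     return span
-- ===== SOURCE B (Python) =====
-- from typing import List
--
-- def generate_span_segmentation(doc_list: List[str]) -> List[int]:
--     # counts words by a direct character scan (a word starts at a non-space char
--     # preceded by a space or the string start) instead of materializing split pieces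
--     span = []
--     j = 0
--     for d in doc_list:
--         n = 0
--         prev = ' '
--         for c in d:
--             if c != ' ' and prev == ' ':
--                 n += 1
--             prev = c
--         span.append(j)
--         span.append(j + n - 1)
--         j += n
--     return span
-- ===== Notes on version B (the rewrite author's own statement) =====
-- stated objective: alternative
-- what changed: Replaces split(' ')+filter word counting with a direct character scan that counts word starts (non-space char preceded by a space or the string start), never materializing the split pieces.
import Mathlib
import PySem

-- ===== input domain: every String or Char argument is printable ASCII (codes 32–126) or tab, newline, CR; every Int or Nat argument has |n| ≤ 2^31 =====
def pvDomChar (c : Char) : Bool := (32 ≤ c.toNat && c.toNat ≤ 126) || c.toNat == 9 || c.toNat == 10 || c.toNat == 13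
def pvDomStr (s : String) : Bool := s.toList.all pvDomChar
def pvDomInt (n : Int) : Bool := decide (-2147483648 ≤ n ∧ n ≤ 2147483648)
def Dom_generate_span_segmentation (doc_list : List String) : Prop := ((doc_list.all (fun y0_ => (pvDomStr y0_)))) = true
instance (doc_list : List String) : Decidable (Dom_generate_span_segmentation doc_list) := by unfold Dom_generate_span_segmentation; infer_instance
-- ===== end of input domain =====

-- B counts a doc's words by a direct character scan (word = run start: non-space char after a space
-- or at the string start) instead of split(' ')+filter; alternative algorithm for the core counting, same cost.

-- ===== PORT A =====
-- state = (span, jdx); each doc appends jdx and jdx+num-1 and advances jdx by num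
def generate_span_segmentation (doc_list : List String) : List Int :=
  (doc_list.foldl
    (fun (st : List Int × Int) d =>
      let num : Int := (((PySem.Str.split? d " ").getD []).filter (fun x => x ≠ "")).length
      (st.1 ++ [st.2, st.2 + num - 1], st.2 + num))
    ([], 0)).1

-- ===== PORT B =====
-- per-doc word count by char scan: state (n, prev), count when c ≠ ' ' and prev = ' '
def generate_span_segmentation_alt (doc_list : List String) : List Int :=
  (doc_list.foldl
    (fun (st : List Int × Int) d =>
      let n : Int :=
        (d.toList.foldl
          (fun (p : Int × Char) c => (if c ≠ ' ' ∧ p.2 = ' ' then p.1 + 1 else p.1, c))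
          ((0 : Int), ' ')).1
      (st.1 ++ [st.2, st.2 + n - 1], st.2 + n)) ([], 0)).1

-- ===== PRECONDITION & SPEC =====
def Spec_generate_span_segmentation (doc_list : List String) (out : List Int) : Prop := out = generate_span_segmentation_alt doc_list
instance (doc_list : List String) (out : List Int) : Decidable (Spec_generate_span_segmentation doc_list out) := by unfold Spec_generate_span_segmentation; infer_instance

-- ===== CLAIM (what is proved, stated in full; the proofs are below) =====
def Claim_equal_generate_span_segmentation : Prop := ∀ (doc_list : List String), Dom_generate_span_segmentation doc_list → Spec_generate_span_segmentation doc_list (generate_span_segmentation doc_list)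

-- ===== LEMMAS AND PROOFS =====

-- number of word starts in l given whether the previous char was a space
def pvRuns : List Char → Bool → Int
  | [], _ => 0
  | c :: cs, ps => (if c ≠ ' ' ∧ ps then 1 else 0) + pvRuns cs (c == ' ')

-- reference model of splitting on a single space
def pvMySplit : List Char → List (List Char)
  | [] => [[]]
  | c :: cs =>
    if c = ' ' then [] :: pvMySplit cs
    else
      match pvMySplit cs with
      | p :: ps => (c :: p) :: ps
      | [] => [[c]]

def pvConsHead (pre : List Char) : List (List Char) → List (List Char)
  | [] => [pre]
  | p :: ps => (pre ++ p) :: ps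

lemma pvMySplit_ne_nil (l : List Char) : pvMySplit l ≠ [] := by
  cases l with
  | nil => simp [pvMySplit]
  | cons c cs =>
    simp only [pvMySplit]
    split
    · simp
    · cases h : pvMySplit cs <;> simp

lemma splitOn_go_spec (l : List Char) : ∀ (cur : List Char) (acc : List (List Char)) (fuel : Nat),
    l.length ≤ fuel →
    PySem.Chars.splitOn.go [' '] fuel l cur acc = acc.reverse ++ pvConsHead cur.reverse (pvMySplit l) := by
  induction l with
  | nil =>
    intro cur acc fuel _
    cases fuel <;> simp [PySem.Chars.splitOn.go, pvMySplit, pvConsHead]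
  | cons c cs ih =>
    intro cur acc fuel hf
    cases fuel with
    | zero => simp at hf
    | succ f =>
      by_cases hc : c = ' '
      · subst hc
        have : ([' '] : List Char).isPrefixOf (' ' :: cs) = true := by simp [List.isPrefixOf]
        simp only [PySem.Chars.splitOn.go, this, if_pos]
        rw [show List.drop ([' '] : List Char).length (' ' :: cs) = cs from rfl]
        rw [ih [] ((cur.reverse) :: acc) f (by simpa using hf)]
        simp [pvMySplit]
        cases h : pvMySplit cs with
        | nil => exact absurd h (pvMySplit_ne_nil cs)
        | cons p ps => simp [pvConsHead]
      · have : ([' '] : List Char).isPrefixOf (c :: cs) = false := by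
          simp [List.isPrefixOf]
          exact fun h => absurd h.symm hc
        simp only [PySem.Chars.splitOn.go, this]
        rw [ih (c :: cur) acc f (by simpa using hf)]
        simp only [pvMySplit, if_neg hc, List.reverse_cons]
        cases h : pvMySplit cs with
        | nil => exact absurd h (pvMySplit_ne_nil cs)
        | cons p ps => simp [pvConsHead]

lemma splitOn_space (l : List Char) : PySem.Chars.splitOn l [' '] = pvMySplit l := by
  unfold PySem.Chars.splitOn
  rw [splitOn_go_spec l [] [] (l.length + 1) (by omega)]
  cases h : pvMySplit l with
  | nil => exact absurd h (pvMySplit_ne_nil l)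
  | cons p ps => simp [pvConsHead]

def pvHeadNE : List Char → Bool
  | [] => false
  | c :: _ => c ≠ ' '

lemma mySplit_headI (l : List Char) : ((pvMySplit l).headI ≠ []) ↔ pvHeadNE l = true := by
  cases l with
  | nil => simp [pvMySplit, pvHeadNE]
  | cons c cs =>
    by_cases hc : c = ' '
    · subst hc; simp [pvMySplit, pvHeadNE]
    · simp only [pvMySplit, if_neg hc, pvHeadNE]
      cases h : pvMySplit cs with
      | nil => exact absurd h (pvMySplit_ne_nil cs)
      | cons p ps => simp [hc]

-- count of nonempty pieces
def pvCountNE (f : List (List Char)) : Int := (f.filter (fun p => p ≠ [])).length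

lemma countNE_runs (l : List Char) :
    pvCountNE (pvMySplit l) = pvRuns l true ∧
    pvCountNE (pvMySplit l) = pvRuns l false + (if pvHeadNE l then 1 else 0) := by
  induction l with
  | nil => simp [pvMySplit, pvCountNE, pvRuns, pvHeadNE]
  | cons c cs ih =>
    by_cases hc : c = ' '
    · subst hc
      constructor
      · simp [pvMySplit, pvCountNE, pvRuns]
        simpa [pvCountNE, pvRuns] using ih.1
      · simp [pvMySplit, pvHeadNE, pvRuns]
        simpa [pvCountNE] using ih.1
    · cases h : pvMySplit cs with
      | nil => exact absurd h (pvMySplit_ne_nil cs)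
      | cons p ps =>
        have hp : (p ≠ []) ↔ pvHeadNE cs = true := by
          have := mySplit_headI cs; rw [h] at this; simpa using this
        have hq := ih.2
        rw [h] at hq
        have e1 : pvCountNE (p :: ps) = pvCountNE ps + (if p = [] then 0 else 1) := by
          by_cases hpn : p = [] <;> simp [pvCountNE, hpn]
        have e2 : (if p = [] then (0 : Int) else 1) = (if pvHeadNE cs then 1 else 0) := by
          by_cases hpn : p = []
          · have hh : pvHeadNE cs = false := by
              cases hcs : pvHeadNE cs
              · rfl
              · exact absurd (hp.mpr hcs) (by simp [hpn])
            simp [hpn, hh]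
          · simp [hpn, hp.mp hpn]
        have hps : pvCountNE ps = pvRuns cs false := by
          rw [e1, e2] at hq; omega
        have hcnt : pvCountNE (pvMySplit (c :: cs)) = 1 + pvCountNE ps := by
          simp only [pvMySplit, if_neg hc, h]
          simp [pvCountNE]
          omega
        have hb : (c == ' ') = false := by simp [hc]
        constructor
        · rw [hcnt, hps]
          simp only [pvRuns, hb]
          split_ifs <;> simp_all
        · rw [hcnt, hps]
          simp only [pvRuns, pvHeadNE, hb]
          split_ifs <;> simp_all <;> omega

-- A's per-doc count as a function of the char list
lemma cntA_eq (d : String) :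
    ((((PySem.Str.split? d " ").getD []).filter (fun x => x ≠ "")).length : Int)
      = pvCountNE (pvMySplit d.toList) := by
  have hsep : (" " : String).toList = [' '] := rfl
  simp only [PySem.Str.split?, PySem.Chars.split?, hsep, List.isEmpty_cons,
    Bool.false_eq_true, if_false, Option.map_some, Option.getD_some, splitOn_space]
  rw [List.filter_map]
  simp only [List.length_map, pvCountNE]
  congr 2
  apply List.filter_congr
  intro p _
  simp [Function.comp, String.ofList_eq_empty_iff]

-- B's per-doc scan equals pvRuns
lemma scan_runs (l : List Char) : ∀ (n : Int) (prev : Char),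
    (l.foldl (fun (p : Int × Char) c => (if c ≠ ' ' ∧ p.2 = ' ' then p.1 + 1 else p.1, c)) (n, prev)).1
      = n + pvRuns l (prev == ' ') := by
  induction l with
  | nil => intro n prev; simp [pvRuns]
  | cons c cs ih =>
    intro n prev
    simp only [List.foldl_cons]
    rw [ih]
    simp only [pvRuns]
    by_cases h : c ≠ ' ' ∧ prev = ' '
    · have : (prev == ' ') = true := by simp [h.2]
      simp [h]
      omega
    · by_cases hp : prev = ' '
      · have hc : c = ' ' := by
          by_contra hx; exact h ⟨hx, hp⟩
        simp [hc, hp]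
      · have : (prev == ' ') = false := by simp [hp]
        simp [h]

-- the two per-doc counts agree
lemma cnt_agree (d : String) :
    ((((PySem.Str.split? d " ").getD []).filter (fun x => x ≠ "")).length : Int)
      = (d.toList.foldl (fun (p : Int × Char) c => (if c ≠ ' ' ∧ p.2 = ' ' then p.1 + 1 else p.1, c)) ((0 : Int), ' ')).1 := by
  rw [cntA_eq, scan_runs]
  simp [(countNE_runs d.toList).1]

-- ===== VERDICT (by name: the statement is the Claim_ definition above) =====
theorem generate_span_segmentation_spec : Claim_equal_generate_span_segmentation := by
  intro doc_list _
  show generate_span_segmentation doc_list = generate_span_segmentation_alt doc_list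
  unfold generate_span_segmentation generate_span_segmentation_alt
  congr 1
  apply List.foldl_ext
  intro st d _
  simp only [← cnt_agree d]
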